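-- pv_equiv track=rewrite | github.com/huggingface/nanotron | tests/helpers/utils.py | get_all_3d_configurations
-- ===== SOURCE A (Python) =====
-- from typing import Any, Callable, Dict, List, Optional, Tuple
--
-- def get_all_3d_configurations(gpus: int) -> List[Tuple[int, int, int]]:
--     """Given a number of gpus, we want all 3d configurations possible such that pp * dp * tp = gpus"""
--     result = []
--     for tp in range(1, gpus + 1):
--         if gpus % tp != 0:
--             continue
--         gpus_left_after_tp = gpus // tp
--         for dp in range(1, gpus_left_after_tp + 1):
--             if gpus_left_after_tp % dp != 0:
--                 continue
--             gpus_left_after_dp = gpus_left_after_tp // dp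
--             for pp in range(1, gpus_left_after_dp + 1):
--                 if gpus_left_after_dp % pp != 0:
--                     continue
--                 if tp * dp * pp == gpus:
--                     result.append((pp, dp, tp))
--     return result
-- ===== SOURCE B (Python) =====
-- from typing import List, Tuple
--
-- def get_all_3d_configurations(gpus: int) -> List[Tuple[int, int, int]]:
--     """Given a number of gpus, we want all 3d configurations possible such that pp * dp * tp = gpus"""
--     # enumerate the divisors of gpus once, in O(sqrt(gpus))
--     divs = []
--     i = 1
--     while i * i <= gpus:
--         if gpus % i == 0:
--             divs.append(i)
--             j = gpus // i
--             if j != i: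
--                 divs.append(j)
--         i += 1
--     divs.sort()
--     result = []
--     for tp in divs:
--         q = gpus // tp
--         for dp in divs:
--             if q % dp == 0:
--                 result.append((q // dp, dp, tp))
--     return result
-- ===== Notes on version B (the rewrite author's own statement) =====
-- stated objective: faster
-- what changed: B enumerates the divisors of gpus once via trial division up to sqrt(gpus) and then pairs divisors, with pp computed directly as the cofactor gpus//(tp*dp), instead of A's three nested full range scans.
import Mathlib
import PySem

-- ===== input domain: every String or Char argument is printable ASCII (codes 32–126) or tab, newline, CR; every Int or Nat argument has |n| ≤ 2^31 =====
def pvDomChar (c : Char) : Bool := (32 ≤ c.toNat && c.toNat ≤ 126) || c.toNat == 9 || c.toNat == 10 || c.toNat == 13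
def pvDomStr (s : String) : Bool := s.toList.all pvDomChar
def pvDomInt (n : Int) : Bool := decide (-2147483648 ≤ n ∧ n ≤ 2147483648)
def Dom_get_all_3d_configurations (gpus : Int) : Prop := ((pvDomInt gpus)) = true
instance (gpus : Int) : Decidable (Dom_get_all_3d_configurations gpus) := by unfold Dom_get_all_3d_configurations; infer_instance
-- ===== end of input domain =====

-- B enumerates the divisors of gpus once by trial division up to sqrt(gpus) and pairs them
-- (pp computed as the cofactor), replacing A's three nested full range scans; objective: faster.

-- ===== PORT A =====
def get_all_3d_configurations (gpus : Int) : List (Int × Int × Int) :=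
  (PySem.List.pyRange 1 (gpus + 1) 1).foldl (fun result tp =>
    if PySem.Int.mod gpus tp ≠ 0 then result
    else
      let gpus_left_after_tp := PySem.Int.floordiv gpus tp
      (PySem.List.pyRange 1 (gpus_left_after_tp + 1) 1).foldl (fun result dp =>
        if PySem.Int.mod gpus_left_after_tp dp ≠ 0 then result
        else
          let gpus_left_after_dp := PySem.Int.floordiv gpus_left_after_tp dp
          (PySem.List.pyRange 1 (gpus_left_after_dp + 1) 1).foldl (fun result pp =>
            if PySem.Int.mod gpus_left_after_dp pp ≠ 0 then result
            else if tp * dp * pp = gpus then result ++ [(pp, dp, tp)]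
            else result) result) result) []

-- ===== PORT B =====
-- the `while i * i <= gpus` loop of Source B; the `1 ≤ i` conjunct is a totality guard only
-- (the loop is entered with i = 1 and i only increases, so it is always true on reachable states)
def pvDivLoop (gpus i : Int) (divs : List Int) : List Int :=
  if h : 1 ≤ i ∧ i * i ≤ gpus then
    pvDivLoop gpus (i + 1)
      (if PySem.Int.mod gpus i = 0 then
        (if PySem.Int.floordiv gpus i ≠ i then divs ++ [i, PySem.Int.floordiv gpus i]
         else divs ++ [i])
       else divs)
  else divs
termination_by (gpus + 1 - i).toNat
decreasing_by
  have h1 : i ≤ i * i := le_mul_of_one_le_left (by omega) h.1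
  have h2 : i ≤ gpus := le_trans h1 h.2
  omega

def get_all_3d_configurations_alt (gpus : Int) : List (Int × Int × Int) :=
  let divs := PySem.List.sorted (pvDivLoop gpus 1 []) (fun x => x) false
  divs.foldl (fun result tp =>
    let q := PySem.Int.floordiv gpus tp
    divs.foldl (fun result dp =>
      if PySem.Int.mod q dp = 0 then result ++ [(PySem.Int.floordiv q dp, dp, tp)]
      else result) result) []

-- ===== PRECONDITION & SPEC =====
def Spec_get_all_3d_configurations (gpus : Int) (out : List (Int × Int × Int)) : Prop := out = get_all_3d_configurations_alt gpus
instance (gpus : Int) (out : List (Int × Int × Int)) : Decidable (Spec_get_all_3d_configurations gpus out) := by unfold Spec_get_all_3d_configurations; infer_instance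

-- ===== CLAIM (what is proved, stated in full; the proofs are below) =====
def Claim_equal_get_all_3d_configurations : Prop := ∀ (gpus : Int), Dom_get_all_3d_configurations gpus → Spec_get_all_3d_configurations gpus (get_all_3d_configurations gpus)

-- ===== LEMMAS AND PROOFS =====

-- the ascending list of positive divisors of n
def pvDs (n : Int) : List Int :=
  (PySem.List.pyRange 1 (n + 1) 1).filter (fun d => decide (PySem.Int.mod n d = 0))

theorem mem_pvDs (n x : Int) : x ∈ pvDs n ↔ 1 ≤ x ∧ x ≤ n ∧ x ∣ n := by
  simp only [pvDs, List.mem_filter, PySem.List.mem_pyRange_one, decide_eq_true_eq,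
    PySem.Int.mod_eq_zero_iff_dvd]
  constructor
  · rintro ⟨⟨h1, h2⟩, h3⟩; exact ⟨h1, by omega, h3⟩
  · rintro ⟨h1, h2, h3⟩; exact ⟨⟨h1, by omega⟩, h3⟩

theorem pairwise_pvDs (n : Int) : (pvDs n).Pairwise (· < ·) :=
  (PySem.List.pairwise_lt_pyRange_one _ _).filter _

theorem pv_sorted_ext (l1 l2 : List Int) (h1 : l1.Pairwise (· < ·)) (h2 : l2.Pairwise (· < ·))
    (hm : ∀ x, x ∈ l1 ↔ x ∈ l2) : l1 = l2 := by
  have hperm : l1.Perm l2 :=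
    (List.perm_ext_iff_of_nodup (h1.imp ne_of_lt) (h2.imp ne_of_lt)).2 hm
  exact List.eq_of_perm_of_sorted (fun a b _ _ hab hba => absurd hba (lt_asymm hab)) h1 h2 hperm

def pvStep (n j : Int) : List Int :=
  if PySem.Int.mod n j = 0 then
    (if PySem.Int.floordiv n j ≠ j then [j, PySem.Int.floordiv n j] else [j])
  else []

theorem pvDivLoop_eq_step (n i : Int) (divs : List Int) :
    pvDivLoop n i divs =
      if 1 ≤ i ∧ i * i ≤ n then pvDivLoop n (i + 1) (divs ++ pvStep n i) else divs := by
  rw [pvDivLoop]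
  by_cases h : 1 ≤ i ∧ i * i ≤ n
  · rw [dif_pos h, if_pos h]
    congr 1
    unfold pvStep
    split_ifs <;> simp [*]
  · rw [dif_neg h, if_neg h]

theorem pvDivLoop_mem (n i : Int) (divs : List Int) (x : Int) (hi : 1 ≤ i) :
    x ∈ pvDivLoop n i divs ↔ x ∈ divs ∨ ∃ j, i ≤ j ∧ j * j ≤ n ∧ x ∈ pvStep n j := by
  rw [pvDivLoop_eq_step]
  split_ifs with h
  · rw [pvDivLoop_mem n (i + 1) (divs ++ pvStep n i) x (by omega)]
    simp only [List.mem_append]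
    constructor
    · rintro ((hx | hx) | ⟨j, hj1, hj2, hj3⟩)
      · exact Or.inl hx
      · exact Or.inr ⟨i, le_refl i, h.2, hx⟩
      · exact Or.inr ⟨j, by omega, hj2, hj3⟩
    · rintro (hx | ⟨j, hj1, hj2, hj3⟩)
      · exact Or.inl (Or.inl hx)
      · rcases eq_or_lt_of_le hj1 with rfl | hlt
        · exact Or.inl (Or.inr hj3)
        · exact Or.inr ⟨j, by omega, hj2, hj3⟩
  · constructor
    · exact Or.inl
    · rintro (hx | ⟨j, hj1, hj2, hj3⟩)
      · exact hx
      · exfalso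
        have hij : i * i ≤ j * j := mul_le_mul hj1 hj1 (by omega) (by omega)
        exact h ⟨hi, by omega⟩
termination_by (n + 1 - i).toNat
decreasing_by
  have h1 : i ≤ i * i := le_mul_of_one_le_left (by omega) h.1
  have h2 : i ≤ n := le_trans h1 h.2
  omega

theorem pvStep_mem (n j x : Int) :
    x ∈ pvStep n j ↔ PySem.Int.mod n j = 0 ∧ (x = j ∨ x = PySem.Int.floordiv n j) := by
  unfold pvStep
  split_ifs with h1 h2 <;> simp_all

theorem pvStep_nodup (n j : Int) : (pvStep n j).Nodup := by
  unfold pvStep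
  split_ifs with h1 h2 <;> simp [*]
  exact fun hc => h2 hc.symm

theorem pvStep_disjoint (n i j : Int) (hi : 1 ≤ i) (hij : i < j) (hjj : j * j ≤ n)
    (x : Int) (hxi : x ∈ pvStep n i) (hxj : x ∈ pvStep n j) : False := by
  rw [pvStep_mem] at hxi hxj
  obtain ⟨hmi, hxi⟩ := hxi
  obtain ⟨hmj, hxj⟩ := hxj
  have hdi : i ∣ n := (PySem.Int.mod_eq_zero_iff_dvd n i).1 hmi
  have hdj : j ∣ n := (PySem.Int.mod_eq_zero_iff_dvd n j).1 hmj
  rw [PySem.Int.floordiv_eq_ediv_of_pos (show (0:Int) < i by omega)] at hxi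
  rw [PySem.Int.floordiv_eq_ediv_of_pos (show (0:Int) < j by omega)] at hxj
  have hji : j ≤ n / j := (Int.le_ediv_iff_mul_le (by omega)).2 hjj
  have hei : n / i * i = n := Int.ediv_mul_cancel hdi
  have hej : n / j * j = n := Int.ediv_mul_cancel hdj
  rcases hxi with rfl | rfl <;> rcases hxj with h | h
  · omega
  · omega
  · -- n / i = j : then j * i = n, with j * j ≤ n = j * i → j ≤ i, contradiction
    rw [h] at hei
    nlinarith
  · -- n / i = n / j : then (n/j) * i = n = (n/j) * j with n/j ≥ j ≥ 1 → i = j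
    rw [h] at hei
    nlinarith

theorem pvDivLoop_nodup (n i : Int) (divs : List Int) (hi : 1 ≤ i) (hd : divs.Nodup)
    (hsep : ∀ x ∈ divs, ∀ j, i ≤ j → j * j ≤ n → x ∉ pvStep n j) :
    (pvDivLoop n i divs).Nodup := by
  rw [pvDivLoop_eq_step]
  split_ifs with h
  · apply pvDivLoop_nodup n (i + 1) (divs ++ pvStep n i) (by omega)
    · exact List.Nodup.append hd (pvStep_nodup n i)
        (fun x hx hx' => hsep x hx i (le_refl i) h.2 hx')
    · intro x hx j hj1 hj2 hxs
      rcases List.mem_append.1 hx with hx | hx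
      · exact hsep x hx j (by omega) hj2 hxs
      · exact pvStep_disjoint n i j h.1 (by omega) hj2 x hx hxs
  · exact hd
termination_by (n + 1 - i).toNat
decreasing_by
  have h1 : i ≤ i * i := le_mul_of_one_le_left (by omega) h.1
  have h2 : i ≤ n := le_trans h1 h.2
  omega

theorem pvDivLoop_char (n x : Int) : x ∈ pvDivLoop n 1 [] ↔ 1 ≤ x ∧ x ≤ n ∧ x ∣ n := by
  rw [pvDivLoop_mem n 1 [] x (le_refl 1)]
  simp only [List.not_mem_nil, false_or]
  constructor
  · rintro ⟨j, hj1, hj2, hjs⟩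
    rw [pvStep_mem] at hjs
    obtain ⟨hmod, hx⟩ := hjs
    have hdvd : j ∣ n := (PySem.Int.mod_eq_zero_iff_dvd n j).1 hmod
    have hn : 1 ≤ n := le_trans (by nlinarith) hj2
    rcases hx with rfl | rfl
    · exact ⟨hj1, by nlinarith, hdvd⟩
    · rw [PySem.Int.floordiv_eq_ediv_of_pos (show (0:Int) < j by omega)]
      have hej : n / j * j = n := Int.ediv_mul_cancel hdvd
      refine ⟨(Int.le_ediv_iff_mul_le (by omega)).2 (by nlinarith), Int.ediv_le_self j (by omega), ?_⟩
      exact ⟨j, hej.symm⟩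
  · rintro ⟨h1, h2, hdvd⟩
    by_cases hxx : x * x ≤ n
    · refine ⟨x, h1, hxx, ?_⟩
      rw [pvStep_mem]
      exact ⟨(PySem.Int.mod_eq_zero_iff_dvd n x).2 hdvd, Or.inl rfl⟩
    · have hex : n / x * x = n := Int.ediv_mul_cancel hdvd
      have he1 : 1 ≤ n / x := (Int.le_ediv_iff_mul_le (by omega)).2 (by omega)
      have helt : n / x < x := by nlinarith
      have hee : n / x * (n / x) ≤ n := by nlinarith
      refine ⟨n / x, he1, hee, ?_⟩
      rw [pvStep_mem]
      have hedvd : n / x ∣ n := ⟨x, hex.symm⟩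
      refine ⟨(PySem.Int.mod_eq_zero_iff_dvd n (n / x)).2 hedvd, Or.inr ?_⟩
      set k := n / x with hk
      rw [PySem.Int.floordiv_eq_ediv_of_pos (show (0:Int) < k by omega), ← hex,
        Int.mul_ediv_cancel_left x (by omega)]


theorem sorted_divloop (n : Int) :
    PySem.List.sorted (pvDivLoop n 1 []) (fun x => x) false = pvDs n := by
  apply PySem.List.sorted_eq_of_perm_of_pairwise_lt
  · refine (List.perm_ext_iff_of_nodup ((pairwise_pvDs n).imp ne_of_lt) ?_).2 ?_
    · exact pvDivLoop_nodup n 1 [] (le_refl 1) List.nodup_nil (by simp)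
    · intro a; rw [mem_pvDs, pvDivLoop_char]
  · exact pairwise_pvDs n

theorem pvDs_filter (n q : Int) (hq1 : 1 ≤ q) (hqn : q ∣ n) (hn : 1 ≤ n) :
    (pvDs n).filter (fun d => decide (PySem.Int.mod q d = 0)) = pvDs q := by
  apply pv_sorted_ext
  · exact (pairwise_pvDs n).filter _
  · exact pairwise_pvDs q
  · intro x
    simp only [List.mem_filter, mem_pvDs, decide_eq_true_eq, PySem.Int.mod_eq_zero_iff_dvd]
    constructor
    · rintro ⟨⟨h1, h2, h3⟩, h4⟩
      exact ⟨h1, Int.le_of_dvd (by omega) h4, h4⟩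
    · rintro ⟨h1, h2, h3⟩
      exact ⟨⟨h1, le_trans h2 (Int.le_of_dvd (by omega) hqn), dvd_trans h3 hqn⟩, h3⟩

theorem flatMap_ite_nil {α β : Type} (l : List α) (c : α → Prop) [DecidablePred c]
    (g : α → List β) :
    l.flatMap (fun x => if c x then g x else []) = (l.filter (fun x => decide (c x))).flatMap g := by
  induction l with
  | nil => simp
  | cons a t ih =>
    by_cases h : c a <;> simp [h, ih]

theorem inner_collapse (n tp dp q2 : Int) (res : List (Int × Int × Int))
    (htp : 1 ≤ tp) (hdp : 1 ≤ dp) (hq2 : 1 ≤ q2) (heq : tp * dp * q2 = n) :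
    (PySem.List.pyRange 1 (q2 + 1) 1).foldl (fun res pp =>
      if PySem.Int.mod q2 pp ≠ 0 then res
      else if tp * dp * pp = n then res ++ [(pp, dp, tp)]
      else res) res = res ++ [(q2, dp, tp)] := by
  have htd : tp * dp ≠ 0 := by positivity
  rw [PySem.List.foldl_congr_mem _ _
      (fun res pp => if pp = q2 then res ++ [(pp, dp, tp)] else res) _ ?_]
  · rw [PySem.List.foldl_append_ite (fun pp => pp = q2) (fun pp => (pp, dp, tp))]
    rw [PySem.List.pyRange_one_succ_right hq2, List.filter_append]
    have h1 : (PySem.List.pyRange 1 q2).filter (fun pp => decide (pp = q2)) = [] := by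
      refine List.filter_eq_nil_iff.2 (fun a ha => ?_)
      have := PySem.List.mem_pyRange_one.1 ha
      simp only [decide_eq_true_eq]
      omega
    rw [h1]
    simp
  · intro acc pp hpp
    dsimp only
    have hb := PySem.List.mem_pyRange_one.1 hpp
    by_cases hpq : pp = q2
    · have hm : PySem.Int.mod q2 q2 = 0 := (PySem.Int.mod_eq_zero_iff_dvd q2 q2).2 dvd_rfl
      rw [hpq]
      simp [hm, heq]
    · simp only [if_neg hpq]
      by_cases hm : PySem.Int.mod q2 pp = 0
      · have hne : ¬ tp * dp * pp = n := by
          intro hc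
          apply hpq
          have : tp * dp * pp = tp * dp * q2 := by rw [hc, heq]
          exact mul_left_cancel₀ htd (by rw [mul_assoc] at this ⊢; exact this)
        simp [hm, hne]
      · simp [hm]

-- the common intermediate form both ports reduce to
def pvSpecList (n : Int) : List (Int × Int × Int) :=
  (pvDs n).flatMap (fun tp =>
    (pvDs (PySem.Int.floordiv n tp)).map (fun dp =>
      (PySem.Int.floordiv (PySem.Int.floordiv n tp) dp, dp, tp)))

theorem middle_collapse (n tp : Int) (res : List (Int × Int × Int))
    (htp1 : 1 ≤ tp) (hdvd : tp ∣ n) (hn : 1 ≤ n) :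
    (PySem.List.pyRange 1 (PySem.Int.floordiv n tp + 1) 1).foldl (fun res dp =>
      if PySem.Int.mod (PySem.Int.floordiv n tp) dp ≠ 0 then res
      else (PySem.List.pyRange 1 (PySem.Int.floordiv (PySem.Int.floordiv n tp) dp + 1) 1).foldl
        (fun res pp =>
          if PySem.Int.mod (PySem.Int.floordiv (PySem.Int.floordiv n tp) dp) pp ≠ 0 then res
          else if tp * dp * pp = n then res ++ [(pp, dp, tp)]
          else res) res) res
    = res ++ (pvDs (PySem.Int.floordiv n tp)).map
        (fun dp => (PySem.Int.floordiv (PySem.Int.floordiv n tp) dp, dp, tp)) := by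
  have htpn : tp ≤ n := Int.le_of_dvd (by omega) hdvd
  have hq1pos : 1 ≤ PySem.Int.floordiv n tp := by
    rw [PySem.Int.floordiv_eq_ediv_of_pos (show (0:Int) < tp by omega)]
    exact (Int.le_ediv_iff_mul_le (by omega)).2 (by omega)
  have hq1mul : PySem.Int.floordiv n tp * tp = n := by
    rw [PySem.Int.floordiv_eq_ediv_of_pos (show (0:Int) < tp by omega)]
    exact Int.ediv_mul_cancel hdvd
  rw [PySem.List.foldl_congr_mem _ _
      (fun res dp => if PySem.Int.mod (PySem.Int.floordiv n tp) dp = 0 then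
        res ++ [(PySem.Int.floordiv (PySem.Int.floordiv n tp) dp, dp, tp)] else res) _ ?_]
  · rw [PySem.List.foldl_append_ite
      (fun dp => PySem.Int.mod (PySem.Int.floordiv n tp) dp = 0)
      (fun dp => (PySem.Int.floordiv (PySem.Int.floordiv n tp) dp, dp, tp))]
    rfl
  · intro acc dp hdp
    dsimp only
    have hb := PySem.List.mem_pyRange_one.1 hdp
    by_cases hm : PySem.Int.mod (PySem.Int.floordiv n tp) dp = 0
    · have hddvd : dp ∣ PySem.Int.floordiv n tp :=
        (PySem.Int.mod_eq_zero_iff_dvd _ dp).1 hm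
      have hq2mul : PySem.Int.floordiv (PySem.Int.floordiv n tp) dp * dp
          = PySem.Int.floordiv n tp := by
        rw [PySem.Int.floordiv_eq_ediv_of_pos (b := dp) (by omega)]
        exact Int.ediv_mul_cancel hddvd
      have hq2pos : 1 ≤ PySem.Int.floordiv (PySem.Int.floordiv n tp) dp := by
        rw [PySem.Int.floordiv_eq_ediv_of_pos (b := dp) (by omega)]
        exact (Int.le_ediv_iff_mul_le (by omega)).2 (by omega)
      have heq : tp * dp * PySem.Int.floordiv (PySem.Int.floordiv n tp) dp = n := by
        nlinarith [hq2mul, hq1mul]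
      rw [if_neg (not_not_intro hm), if_pos hm]
      exact inner_collapse n tp dp _ acc htp1 (by omega) hq2pos heq
    · simp [hm]

theorem a_eq_spec (n : Int) : get_all_3d_configurations n = pvSpecList n := by
  unfold get_all_3d_configurations
  rw [PySem.List.foldl_congr_mem _ _
      (fun res tp => res ++ (if PySem.Int.mod n tp = 0 then
        (pvDs (PySem.Int.floordiv n tp)).map
          (fun dp => (PySem.Int.floordiv (PySem.Int.floordiv n tp) dp, dp, tp))
      else [])) _ ?_]
  · rw [PySem.List.foldl_append_eq_flatMap, flatMap_ite_nil]
    rfl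
  · intro acc tp htp
    dsimp only
    have hb := PySem.List.mem_pyRange_one.1 htp
    by_cases hm : PySem.Int.mod n tp = 0
    · have hdvd : tp ∣ n := (PySem.Int.mod_eq_zero_iff_dvd n tp).1 hm
      have hn : 1 ≤ n := by omega
      rw [if_neg (not_not_intro hm), if_pos hm]
      exact middle_collapse n tp acc (by omega) hdvd hn
    · simp [hm]

theorem b_eq_spec (n : Int) : get_all_3d_configurations_alt n = pvSpecList n := by
  unfold get_all_3d_configurations_alt
  rw [sorted_divloop]
  rw [PySem.List.foldl_congr_mem _ _
      (fun res tp => res ++ (pvDs (PySem.Int.floordiv n tp)).map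
        (fun dp => (PySem.Int.floordiv (PySem.Int.floordiv n tp) dp, dp, tp))) _ ?_]
  · rw [PySem.List.foldl_append_eq_flatMap]
    rfl
  · intro acc tp htp
    dsimp only
    obtain ⟨htp1, htpn, htpdvd⟩ := (mem_pvDs n tp).1 htp
    have hn : 1 ≤ n := by omega
    have hq1 : 1 ≤ PySem.Int.floordiv n tp := by
      rw [PySem.Int.floordiv_eq_ediv_of_pos (show (0:Int) < tp by omega)]
      exact (Int.le_ediv_iff_mul_le (by omega)).2 (by omega)
    have hqn : PySem.Int.floordiv n tp ∣ n := by
      rw [PySem.Int.floordiv_eq_ediv_of_pos (show (0:Int) < tp by omega)]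
      exact ⟨tp, (Int.ediv_mul_cancel htpdvd).symm⟩
    rw [PySem.List.foldl_append_ite
      (fun dp => PySem.Int.mod (PySem.Int.floordiv n tp) dp = 0)
      (fun dp => (PySem.Int.floordiv (PySem.Int.floordiv n tp) dp, dp, tp))]
    rw [pvDs_filter n (PySem.Int.floordiv n tp) hq1 hqn hn]

-- ===== VERDICT (by name: the statement is the Claim_ definition above) =====
theorem get_all_3d_configurations_spec : Claim_equal_get_all_3d_configurations := by
  intro gpus _
  unfold Spec_get_all_3d_configurations
  rw [a_eq_spec, b_eq_spec]
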